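-- pv_equiv track=rewrite | github.com/manhd89/Rules-json | main.py | remove_subdomains_if_higher
-- ===== SOURCE A (Python) =====
-- def remove_subdomains_if_higher(domains: set[str]) -> set[str]:
--     top_level_domains = set()
--
--     for domain in domains:
--         parts = domain.split(".")
--
--         is_lower_subdomain = False
--         for i in range(1, len(parts)):
--             higher_domain = ".".join(parts[i:])
--             if higher_domain in domains:
--                 is_lower_subdomain = True
--                 break
--
--         if not is_lower_subdomain:
--             top_level_domains.add(domain)
--
--     return top_level_domains
-- ===== SOURCE B (Python) =====
-- def remove_subdomains_if_higher(domains: set[str]) -> set[str]: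
--     # Keep d unless some member t of the set is a proper dot-suffix of d,
--     # i.e. d ends with "." + t.  No splitting: one pairwise suffix scan.
--     return {d for d in domains if not any(d.endswith("." + t) for t in domains)}
-- ===== Notes on version B (the rewrite author's own statement) =====
-- stated objective: simpler
-- what changed: B drops the split/join machinery entirely: instead of rebuilding every dot-suffix of each domain and probing the set, it keeps d iff no member t of the set satisfies d.endswith('.' + t), as a single set comprehension.
import Mathlib
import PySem

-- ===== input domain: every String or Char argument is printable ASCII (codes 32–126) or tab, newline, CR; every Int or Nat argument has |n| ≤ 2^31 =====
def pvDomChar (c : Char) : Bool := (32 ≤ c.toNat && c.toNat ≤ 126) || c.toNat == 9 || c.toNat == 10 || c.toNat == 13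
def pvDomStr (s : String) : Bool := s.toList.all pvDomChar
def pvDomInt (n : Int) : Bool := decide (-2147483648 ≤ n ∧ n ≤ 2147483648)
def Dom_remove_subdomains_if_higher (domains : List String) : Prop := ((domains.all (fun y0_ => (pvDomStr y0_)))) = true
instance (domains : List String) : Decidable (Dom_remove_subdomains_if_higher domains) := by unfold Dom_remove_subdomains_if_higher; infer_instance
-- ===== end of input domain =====

-- B replaces A's split/join suffix generation by a direct pairwise endswith scan (objective: simpler).
-- The Python inputs/outputs are sets (order-insensitive); the ports represent them as distinct-element lists.

-- ===== PORT A =====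
def remove_subdomains_if_higher (domains : List String) : List String :=
  domains.foldl
    (fun top_level_domains domain =>
      -- parts = domain.split(".")  (sep "." is nonempty, so split? is always `some`)
      let parts : List String := (PySem.Str.split? domain ".").getD []
      -- for i in range(1, len(parts)): if ".".join(parts[i:]) in domains: break  (break = Bool any)
      let is_lower_subdomain : Bool :=
        (PySem.List.pyRange 1 (parts.length : Int) 1).any
          (fun i => PySem.Set.contains domains
            (PySem.Str.join "." (PySem.List.slice parts (some i) none)))
      if is_lower_subdomain then top_level_domains
      else PySem.Set.add top_level_domains domain)
    PySem.Set.empty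

-- ===== PORT B =====
def remove_subdomains_if_higher_alt (domains : List String) : List String :=
  PySem.Set.ofList
    (domains.filter (fun d => ! domains.any (fun t => PySem.Str.endswith d ("." ++ t))))

-- ===== PRECONDITION & SPEC =====
def Spec_remove_subdomains_if_higher (domains : List String) (out : List String) : Prop := out = remove_subdomains_if_higher_alt domains
instance (domains : List String) (out : List String) : Decidable (Spec_remove_subdomains_if_higher domains out) := by unfold Spec_remove_subdomains_if_higher; infer_instance

-- ===== CLAIM (what is proved, stated in full; the proofs are below) =====
def Claim_equal_remove_subdomains_if_higher : Prop := ∀ (domains : List String), Dom_remove_subdomains_if_higher domains → Spec_remove_subdomains_if_higher domains (remove_subdomains_if_higher domains)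

-- ===== LEMMAS AND PROOFS =====

-- Structural model of Python's s.split(".") on char lists (proof-side only).
def splitDot : List Char → List (List Char)
  | [] => [[]]
  | c :: rest =>
    if c = '.' then [] :: splitDot rest
    else
      match splitDot rest with
      | p :: ps => (c :: p) :: ps
      | [] => [[c]]

theorem splitDot_cons_dot (rest : List Char) : splitDot ('.' :: rest) = [] :: splitDot rest := by
  simp [splitDot]

theorem splitDot_ne_nil (cs : List Char) : splitDot cs ≠ [] := by
  induction cs with
  | nil => simp [splitDot]
  | cons c rest ih =>
    simp only [splitDot]
    split
    · simp
    · cases h : splitDot rest <;> simp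

theorem splitOn_go_eq (fuel : Nat) (l cur : List Char) (acc : List (List Char))
    (h : l.length ≤ fuel) :
    PySem.Chars.splitOn.go ['.'] fuel l cur acc
      = acc.reverse ++ (cur.reverse ++ (splitDot l).headI) :: (splitDot l).tail := by
  induction fuel generalizing l cur acc with
  | zero =>
    interval_cases hl : l.length
    rw [List.length_eq_zero_iff] at hl
    subst hl
    rw [PySem.Chars.splitOn.go.eq_def]
    simp [splitDot]
  | succ fuel ih =>
    cases l with
    | nil =>
      rw [PySem.Chars.splitOn.go.eq_def]
      simp [splitDot]
    | cons c rest =>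
      rw [PySem.Chars.splitOn.go.eq_def]
      simp only []
      by_cases hc : c = '.'
      · subst hc
        have hpre : List.isPrefixOf ['.'] ('.' :: rest) = true := by
          simp [List.isPrefixOf]
        simp only [hpre, if_pos, List.length_cons, List.length_nil, List.drop_succ_cons, List.drop_zero]
        rw [ih rest [] (cur.reverse :: acc) (by simpa using Nat.lt_succ_iff.mp (by simpa using h))]
        have hne := splitDot_ne_nil rest
        cases hsp : splitDot rest with
        | nil => exact absurd hsp hne
        | cons p ps => simp [splitDot, hsp]
      · have hpre : List.isPrefixOf ['.'] (c :: rest) = false := by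
          simp [List.isPrefixOf]
          exact fun hh => hc hh.symm
        simp only [hpre, Bool.false_eq_true, if_false]
        rw [ih rest (c :: cur) acc (by simpa using Nat.lt_succ_iff.mp (by simpa using h))]
        have hne := splitDot_ne_nil rest
        cases hsp : splitDot rest with
        | nil => exact absurd hsp hne
        | cons p ps => simp [splitDot, hc, hsp]

theorem splitOn_eq_splitDot (cs : List Char) :
    PySem.Chars.splitOn cs ['.'] = splitDot cs := by
  unfold PySem.Chars.splitOn
  rw [splitOn_go_eq cs.length.succ cs [] [] (Nat.le_succ _)]
  have hne := splitDot_ne_nil cs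
  cases hsp : splitDot cs with
  | nil => exact absurd hsp hne
  | cons p ps => simp

theorem join_append_nonempty (A B : List (List Char)) (ha : A ≠ []) (hb : B ≠ []) :
    PySem.Chars.join ['.'] (A ++ B)
      = PySem.Chars.join ['.'] A ++ '.' :: PySem.Chars.join ['.'] B := by
  induction A with
  | nil => exact absurd rfl ha
  | cons p A' ih =>
    cases A' with
    | nil =>
      cases B with
      | nil => exact absurd rfl hb
      | cons q B' => simp [PySem.Chars.join_cons_cons, PySem.Chars.join_singleton]
    | cons p2 A'' =>
      have := ih (by simp)
      rw [List.cons_append, PySem.Chars.join_cons_cons]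
      rw [List.cons_append] at this ⊢
      rw [PySem.Chars.join_cons_cons, this]
      simp

theorem join_splitDot (cs : List Char) :
    PySem.Chars.join ['.'] (splitDot cs) = cs := by
  induction cs with
  | nil => simp [splitDot, PySem.Chars.join_singleton]
  | cons c rest ih =>
    by_cases hc : c = '.'
    · subst hc
      rw [splitDot_cons_dot]
      have hne := splitDot_ne_nil rest
      cases hsp : splitDot rest with
      | nil => exact absurd hsp hne
      | cons p ps =>
        rw [PySem.Chars.join_cons_cons]
        rw [hsp] at ih
        simp [ih]
    · simp only [splitDot, if_neg hc]
      have hne := splitDot_ne_nil rest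
      cases hsp : splitDot rest with
      | nil => exact absurd hsp hne
      | cons p ps =>
        rw [hsp] at ih
        cases ps with
        | nil =>
          rw [PySem.Chars.join_singleton] at ih ⊢
          simp [ih]
        | cons q qs =>
          rw [PySem.Chars.join_cons_cons] at ih ⊢
          simp [← ih]

theorem splitDot_append (xs ys : List Char) :
    splitDot (xs ++ '.' :: ys) = splitDot xs ++ splitDot ys := by
  induction xs with
  | nil => simp [splitDot]
  | cons c xs' ih =>
    simp only [List.cons_append, splitDot]
    by_cases hc : c = '.'
    · simp [hc, ih]
    · simp only [if_neg hc, ih]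
      have hne := splitDot_ne_nil xs'
      cases hsp : splitDot xs' with
      | nil => exact absurd hsp hne
      | cons p ps => simp

-- the characterisation: "." + t is a suffix of cs  ↔  t is the join of a proper tail of cs's parts
theorem suffix_iff_join_drop (cs t : List Char) :
    ('.' :: t) <:+ cs
      ↔ ∃ n : Nat, 1 ≤ n ∧ n < (splitDot cs).length
          ∧ PySem.Chars.join ['.'] ((splitDot cs).drop n) = t := by
  constructor
  · rintro ⟨xs, rfl⟩
    refine ⟨(splitDot xs).length, ?_, ?_, ?_⟩
    · have := splitDot_ne_nil xs
      cases h : splitDot xs with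
      | nil => exact absurd h this
      | cons p ps => simp
    · rw [splitDot_append]
      have := splitDot_ne_nil t
      cases h : splitDot t with
      | nil => exact absurd h this
      | cons p ps => simp
    · rw [splitDot_append, List.drop_left, join_splitDot]
  · rintro ⟨n, h1, h2, rfl⟩
    refine ⟨PySem.Chars.join ['.'] ((splitDot cs).take n), ?_⟩
    have htake : (splitDot cs).take n ≠ [] := by
      simp only [ne_eq, List.take_eq_nil_iff, not_or]
      exact ⟨by omega, splitDot_ne_nil cs⟩
    have hdrop : (splitDot cs).drop n ≠ [] := by
      simp only [ne_eq, List.drop_eq_nil_iff, not_le]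
      omega
    have := join_append_nonempty ((splitDot cs).take n) ((splitDot cs).drop n) htake hdrop
    rw [List.take_append_drop, join_splitDot] at this
    exact this.symm

-- parts of A's port, identified with splitDot over the char list
theorem partsA_eq (d : String) :
    (PySem.Str.split? d ".").getD [] = (splitDot d.toList).map String.ofList := by
  have h : PySem.Str.split? d "."
      = some ((PySem.Chars.splitOn d.toList ['.']).map String.ofList) := by
    simp [PySem.Str.split?, PySem.Chars.split?]
  rw [h, splitOn_eq_splitDot]
  rfl

-- pointwise: A's break-flag equals B's any-flag
theorem flag_eq (domains : List String) (d : String) :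
    ((PySem.List.pyRange 1 (((PySem.Str.split? d ".").getD []).length : Int) 1).any
        (fun i => PySem.Set.contains domains
          (PySem.Str.join "." (PySem.List.slice ((PySem.Str.split? d ".").getD []) (some i) none))))
      = domains.any (fun t => PySem.Str.endswith d ("." ++ t)) := by
  rw [Bool.eq_iff_iff]
  rw [List.any_eq_true, List.any_eq_true]
  constructor
  · rintro ⟨i, hi, hc⟩
    rw [PySem.List.mem_pyRange_one] at hi
    rw [PySem.Set.contains_iff] at hc
    refine ⟨_, hc, ?_⟩
    rw [PySem.Str.endswith_eq, PySem.Chars.endswith_iff, String.toList_append]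
    have h1 : ("." : String).toList = ['.'] := rfl
    rw [h1, List.singleton_append, suffix_iff_join_drop]
    refine ⟨i.toNat, by omega, ?_, ?_⟩
    · rw [partsA_eq] at hi
      simp only [List.length_map] at hi
      omega
    · rw [PySem.List.slice_from _ (by omega : (0:Int) ≤ i), partsA_eq]
      have : (PySem.Str.join "." ((splitDot d.toList).map String.ofList |>.drop i.toNat)).toList
          = PySem.Chars.join ['.'] ((splitDot d.toList).drop i.toNat) := by
        rw [PySem.Str.toList_join, ← List.map_drop, List.map_map]
        simp [Function.comp_def, String.toList_ofList]
      rw [← this]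
  · rintro ⟨t, ht, he⟩
    rw [PySem.Str.endswith_eq, PySem.Chars.endswith_iff, String.toList_append] at he
    have h1 : ("." : String).toList = ['.'] := rfl
    rw [h1, List.singleton_append, suffix_iff_join_drop] at he
    obtain ⟨n, hn1, hn2, hn3⟩ := he
    refine ⟨(n : Int), ?_, ?_⟩
    · rw [PySem.List.mem_pyRange_one, partsA_eq]
      simp only [List.length_map]
      omega
    · rw [PySem.Set.contains_iff]
      have hj : PySem.Str.join "." (PySem.List.slice ((PySem.Str.split? d ".").getD []) (some (n:Int)) none) = t := by
        rw [PySem.List.slice_from _ (by omega : (0:Int) ≤ (n:Int)), partsA_eq]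
        apply String.toList_inj.mp
        rw [PySem.Str.toList_join]
        rw [Int.toNat_natCast, ← List.map_drop, List.map_map]
        have : (String.toList ∘ String.ofList) = id := by
          funext l; simp [String.toList_ofList]
        rw [this, List.map_id]
        exact hn3
      rw [hj]; exact ht

-- A's guarded fold is the plain Set.add fold of the filtered list
theorem foldl_if_add (p : String → Bool) (xs : List String) (s : List String) :
    xs.foldl (fun acc d => if p d then acc else PySem.Set.add acc d) s
      = (xs.filter (fun d => ! p d)).foldl PySem.Set.add s := by
  induction xs generalizing s with
  | nil => rfl
  | cons x xs' ih =>
    simp only [List.foldl_cons, List.filter_cons]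
    by_cases hx : p x
    · simp [hx, ih]
    · simp [hx, ih]

-- ===== VERDICT (by name: the statement is the Claim_ definition above) =====
theorem remove_subdomains_if_higher_spec : Claim_equal_remove_subdomains_if_higher := by
  intro domains _
  show remove_subdomains_if_higher domains = remove_subdomains_if_higher_alt domains
  unfold remove_subdomains_if_higher remove_subdomains_if_higher_alt
  simp only []
  rw [foldl_if_add]
  rw [PySem.Set.ofList_eq_foldl]
  congr 1
  apply List.filter_congr
  intro d _
  rw [flag_eq]
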